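-- pv_equiv track=rewrite | github.com/jmgccp4eva/Mass-Shootings-2023-Data-Python | plotter.py | sort_dict_and_extract
-- ===== SOURCE A (Python) =====
-- def sort_dict_and_extract(sizes):
--     my_keys = list(sizes.keys())
--     my_keys.sort()
--     sizes = {i: sizes[i] for i in my_keys}
--     my_vals = list(sizes.values())
--     sizes2 = [0, 0]
--     for k, v in sizes.items():
--         if k <= 6:
--             sizes2[0] += int(v)
--         else:
--             sizes2[1] += int(v)
--     return sizes, sizes2, my_keys, my_vals
-- ===== SOURCE B (Python) =====
-- def sort_dict_and_extract(sizes):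
--     my_keys = sorted(sizes)
--     sizes = {k: sizes[k] for k in my_keys}
--     my_vals = list(sizes.values())
--     # binary search for the boundary: number of keys <= 6 (keys are sorted)
--     lo, hi = 0, len(my_keys)
--     while lo < hi:
--         mid = (lo + hi) // 2
--         if 6 < my_keys[mid]:
--             hi = mid
--         else:
--             lo = mid + 1
--     sizes2 = [sum(int(v) for v in my_vals[:lo]), sum(int(v) for v in my_vals[lo:])]
--     return sizes, sizes2, my_keys, my_vals
-- ===== Notes on version B (the rewrite author's own statement) =====
-- stated objective: alternative
-- what changed: The key-testing accumulation loop is replaced by a hand-written binary search on the sorted key list for the <=6/>6 boundary, after which the two bucket totals are sums of the two value slices instead of per-item branch accumulation.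
import Mathlib
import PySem

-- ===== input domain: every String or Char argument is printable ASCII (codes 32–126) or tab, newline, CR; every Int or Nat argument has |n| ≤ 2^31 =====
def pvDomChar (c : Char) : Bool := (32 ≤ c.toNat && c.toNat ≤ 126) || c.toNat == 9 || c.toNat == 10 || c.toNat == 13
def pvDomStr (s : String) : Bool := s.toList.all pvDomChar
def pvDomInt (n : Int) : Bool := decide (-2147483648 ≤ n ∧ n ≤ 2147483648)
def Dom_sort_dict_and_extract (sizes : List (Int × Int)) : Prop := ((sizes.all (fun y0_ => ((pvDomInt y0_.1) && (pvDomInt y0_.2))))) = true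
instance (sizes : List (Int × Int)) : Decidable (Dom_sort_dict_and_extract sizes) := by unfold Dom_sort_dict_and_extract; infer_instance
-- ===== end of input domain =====

-- B replaces A's key-testing accumulation loop by a binary search for the <=6 boundary on the
-- sorted keys plus sums of the two value slices (objective: alternative decomposition, same cost).

-- ===== PORT A =====
-- the dict argument: an association list is turned into the Python dict it denotes (last value
-- wins, first position kept), exactly dict(pairs)
def sort_dict_and_extract (sizes0 : List (Int × Int)) : (List (Int × Int)) × List Int × List Int × List Int :=
  let sizes : PySem.Dict Int Int := PySem.Dict.ofList sizes0
  let my_keys := PySem.List.sorted (PySem.Dict.keys sizes) (fun k => k) false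
  -- {i: sizes[i] for i in my_keys}; every i is a key of sizes, so getD's default is never read
  let sizes' := my_keys.foldl (fun d i => d.insert i (sizes.getD i 0)) PySem.Dict.empty
  let my_vals := sizes'.values
  -- for k, v in sizes.items(): two-bucket accumulation; int(v) = v on int values
  let sizes2 := sizes'.items.foldl
    (fun (p : Int × Int) kv => if kv.1 ≤ 6 then (p.1 + kv.2, p.2) else (p.1, p.2 + kv.2)) (0, 0)
  (sizes'.items, [sizes2.1, sizes2.2], my_keys, my_vals)

-- ===== PORT B =====
-- Source B's hand-written binary search while-loop (Source B may not import bisect: A imports nothing),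
-- transcribed with a structural fuel = hi - lo (the loop shrinks hi - lo each turn, so the fuel
-- branch is never the one that answers); mid is always < xs.length (lo < hi ≤ length throughout),
-- so getD's default is never read
def pvBisectLoop (xs : List Int) (x : Int) : Nat → Nat → Nat → Nat
  | 0, lo, _ => lo
  | fuel + 1, lo, hi =>
    if lo < hi then
      let mid := (lo + hi) / 2
      if x < xs.getD mid 0 then pvBisectLoop xs x fuel lo mid
      else pvBisectLoop xs x fuel (mid + 1) hi
    else lo

def sort_dict_and_extract_alt (sizes0 : List (Int × Int)) : (List (Int × Int)) × List Int × List Int × List Int :=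
  let orig : PySem.Dict Int Int := PySem.Dict.ofList sizes0
  let my_keys := PySem.List.sorted (PySem.Dict.keys orig) (fun k => k) false
  let d := my_keys.foldl (fun d k => d.insert k (orig.getD k 0)) PySem.Dict.empty
  let my_vals := d.values
  let c := pvBisectLoop my_keys 6 my_keys.length 0 my_keys.length
  (d.items, [(my_vals.take c).sum, (my_vals.drop c).sum], my_keys, my_vals)

-- ===== PRECONDITION & SPEC =====
def Spec_sort_dict_and_extract (sizes : List (Int × Int)) (out : (List (Int × Int)) × List Int × List Int × List Int) : Prop := out = sort_dict_and_extract_alt sizes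
instance (sizes : List (Int × Int)) (out : (List (Int × Int)) × List Int × List Int × List Int) : Decidable (Spec_sort_dict_and_extract sizes out) := by unfold Spec_sort_dict_and_extract; infer_instance

-- ===== CLAIM (what is proved, stated in full; the proofs are below) =====
def Claim_equal_sort_dict_and_extract : Prop := ∀ (sizes : List (Int × Int)), Dom_sort_dict_and_extract sizes → Spec_sort_dict_and_extract sizes (sort_dict_and_extract sizes)

-- ===== LEMMAS AND PROOFS =====

-- the binary search returns a split point: everything left of it is ≤ x, everything from it on is > x
theorem pvBisectLoop_spec (xs : List Int) (x : Int) (hs : xs.Pairwise (· ≤ ·)) :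
    ∀ fuel lo hi, hi - lo ≤ fuel → lo ≤ hi → hi ≤ xs.length →
    (∀ j, j < lo → ∀ hj : j < xs.length, xs[j] ≤ x) →
    (∀ j, hi ≤ j → ∀ hj : j < xs.length, x < xs[j]) →
    pvBisectLoop xs x fuel lo hi ≤ xs.length ∧
    (∀ j, (hj : j < xs.length) → j < pvBisectLoop xs x fuel lo hi → xs[j] ≤ x) ∧
    (∀ j, (hj : j < xs.length) → pvBisectLoop xs x fuel lo hi ≤ j → x < xs[j]) := by
  intro fuel
  induction fuel with
  | zero =>
    intro lo hi hfuel hle hhi hL hR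
    have hlohi : lo = hi := by omega
    rw [pvBisectLoop]
    exact ⟨by omega, fun j hj hjl => hL j hjl hj,
           fun j hj hjl => hR j (by omega) hj⟩
  | succ fuel ih =>
    intro lo hi hfuel hle hhi hL hR
    by_cases hlt : lo < hi
    · rw [pvBisectLoop, if_pos hlt]
      set mid := (lo + hi) / 2 with hmiddef
      have hmid : mid < xs.length := by omega
      have hgd : xs.getD mid 0 = xs[mid] := List.getD_eq_getElem xs 0 hmid
      by_cases hx : x < xs.getD mid 0
      · rw [if_pos hx]
        have hxm : x < xs[mid] := by rw [← hgd]; exact hx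
        refine ih lo mid (by omega) (by omega) (by omega) hL ?_
        intro j hj hjlen
        have hmono : xs[mid] ≤ xs[j] := by
          rcases Nat.eq_or_lt_of_le hj with h | h
          · simp [← h]
          · exact List.pairwise_iff_getElem.mp hs mid j hmid hjlen h
        omega
      · rw [if_neg hx]
        have hxm : ¬ x < xs[mid] := by rw [← hgd]; exact hx
        refine ih (mid + 1) hi (by omega) (by omega) hhi ?_ hR
        intro j hj hjlen
        have hmono : xs[j] ≤ xs[mid] := by
          rcases Nat.lt_or_ge j mid with h | h
          · exact List.pairwise_iff_getElem.mp hs j mid hjlen hmid h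
          · have hje : j = mid := by omega
            simp [hje]
        omega
    · rw [pvBisectLoop, if_neg hlt]
      exact ⟨by omega, fun j hj hjl => hL j hjl hj, fun j hj hjl => hR j (by omega) hj⟩

-- a two-bucket accumulation over a list is the pair of its two filtered sums
theorem foldl_buckets (L : List (Int × Int)) (a b : Int) :
    L.foldl (fun (p : Int × Int) kv => if kv.1 ≤ 6 then (p.1 + kv.2, p.2) else (p.1, p.2 + kv.2)) (a, b)
      = (a + ((L.filter (fun kv => kv.1 ≤ 6)).map (·.2)).sum,
         b + ((L.filter (fun kv => 6 < kv.1)).map (·.2)).sum) := by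
  induction L generalizing a b with
  | nil => simp
  | cons hd tl ih =>
    by_cases h : hd.1 ≤ 6
    · simp [h, not_lt.mpr h, ih, add_assoc]
    · simp [h, not_le.mp h, ih, add_assoc]

-- a filter whose predicate holds exactly on the first c positions is take c / drop c
theorem filter_eq_take_drop (L : List (Int × Int)) (c : Nat) (hc : c ≤ L.length)
    (hL : ∀ j, (hj : j < L.length) → j < c → L[j].1 ≤ 6)
    (hR : ∀ j, (hj : j < L.length) → c ≤ j → 6 < L[j].1) :
    L.filter (fun kv => kv.1 ≤ 6) = L.take c ∧
    L.filter (fun kv => 6 < kv.1) = L.drop c := by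
  induction L generalizing c with
  | nil => simp
  | cons hd tl ih =>
    cases c with
    | zero =>
      have h0 : 6 < hd.1 := hR 0 (by simp) (by omega)
      have htl := ih 0 (by omega) (by omega)
        (fun j hj hcj => by simpa using hR (j+1) (by simpa using Nat.succ_lt_succ hj) (by omega))
      refine ⟨?_, ?_⟩
      · simpa [List.filter_cons, decide_eq_false (not_le.mpr h0)] using htl.1
      · simpa [List.filter_cons, decide_eq_true h0] using htl.2
    | succ c' =>
      have h0 : hd.1 ≤ 6 := hL 0 (by simp) (by omega)
      have htl := ih c' (by simpa using hc)
        (fun j hj hcj => by simpa using hL (j+1) (by simpa using Nat.succ_lt_succ hj) (by omega))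
        (fun j hj hcj => by simpa using hR (j+1) (by simpa using Nat.succ_lt_succ hj) (by omega))
      refine ⟨?_, ?_⟩
      · simpa [List.filter_cons, decide_eq_true h0] using htl.1
      · simpa [List.filter_cons, decide_eq_false (not_lt.mpr h0)] using htl.2

-- the shared core: A's bucket loop over the rebuilt sorted dict equals B's (take/drop at the
-- binary-search boundary) pair of slice sums
theorem sizes2_eq (orig : PySem.Dict Int Int) (hnd : orig.keys.Nodup) :
    ((PySem.List.sorted orig.keys (fun k => k) false).foldl
        (fun d i => d.insert i (orig.getD i 0)) PySem.Dict.empty).items.foldl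
      (fun (p : Int × Int) kv => if kv.1 ≤ 6 then (p.1 + kv.2, p.2) else (p.1, p.2 + kv.2)) (0, 0)
    = ((((PySem.List.sorted orig.keys (fun k => k) false).foldl
          (fun d i => d.insert i (orig.getD i 0)) PySem.Dict.empty).values.take
            (pvBisectLoop (PySem.List.sorted orig.keys (fun k => k) false) 6
              (PySem.List.sorted orig.keys (fun k => k) false).length 0
              (PySem.List.sorted orig.keys (fun k => k) false).length)).sum,
       (((PySem.List.sorted orig.keys (fun k => k) false).foldl
          (fun d i => d.insert i (orig.getD i 0)) PySem.Dict.empty).values.drop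
            (pvBisectLoop (PySem.List.sorted orig.keys (fun k => k) false) 6
              (PySem.List.sorted orig.keys (fun k => k) false).length 0
              (PySem.List.sorted orig.keys (fun k => k) false).length)).sum) := by
  set ks := PySem.List.sorted orig.keys (fun k => k) false with hks
  have hnodup : ks.Nodup :=
    (PySem.List.sorted_perm orig.keys (fun k => k) false).nodup_iff.mpr hnd
  have hsorted : ks.Pairwise (· ≤ ·) := by
    simpa using PySem.List.sorted_pairwise orig.keys (fun k => k)
  have hitems : (ks.foldl (fun d i => d.insert i (orig.getD i 0)) PySem.Dict.empty).items
      = ks.map (fun k => (k, orig.getD k 0)) := by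
    simpa using PySem.Dict.items_foldl_insert_fresh ks (fun k => k) (fun k => orig.getD k 0)
      PySem.Dict.empty (fun a _ => by simp [PySem.Dict.contains_empty]) (by simpa using hnodup)
  have hvals : (ks.foldl (fun d i => d.insert i (orig.getD i 0)) PySem.Dict.empty).values
      = (ks.map (fun k => (k, orig.getD k 0))).map (·.2) := by
    simp only [PySem.Dict.values, hitems]
  set L := ks.map (fun k => (k, orig.getD k 0)) with hLdef
  have hLlen : L.length = ks.length := by simp [hLdef]
  obtain ⟨hcle, hleft, hright⟩ :=
    pvBisectLoop_spec ks 6 hsorted ks.length 0 ks.length (by omega) (by omega) le_rfl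
      (by omega) (fun j hj hjl => by omega)
  have hLget : ∀ j, (hj : j < L.length) → L[j].1 = ks[j]'(hLlen ▸ hj) := by
    intro j hj; simp [hLdef]
  obtain ⟨hfil1, hfil2⟩ := filter_eq_take_drop L (pvBisectLoop ks 6 ks.length 0 ks.length) (by omega)
    (fun j hj hjc => by rw [hLget j hj]; exact hleft j (by omega) hjc)
    (fun j hj hjc => by rw [hLget j hj]; exact hright j (by omega) hjc)
  rw [hitems, hvals, foldl_buckets]
  refine Prod.ext ?_ ?_
  · simp only [zero_add, hfil1, List.map_take]
  · simp only [zero_add, hfil2, List.map_drop]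

-- ===== VERDICT (by name: the statement is the Claim_ definition above) =====
theorem sort_dict_and_extract_spec : Claim_equal_sort_dict_and_extract := by
  intro sizes0 _
  unfold Spec_sort_dict_and_extract
  simp only [sort_dict_and_extract, sort_dict_and_extract_alt]
  refine Prod.ext rfl (Prod.ext ?_ rfl)
  have h := sizes2_eq (PySem.Dict.ofList sizes0) (PySem.Dict.nodup_keys_ofList sizes0)
  rw [h]
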